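-- pv_equiv track=rewrite | github.com/neuralinterfacinglab/SpeechTargets | detect_speech_shaft.py | get_shaft_indices_GS
-- ===== SOURCE A (Python) =====
-- def get_shaft_indices_GS(channels, elec_map, timeframes=5):
--     """Get name of each shaft and its indices, excluding
--
--     Parameters
--     ----------
--     channels: array (electrodes, label)
--         Channel names
--     elec_map: dict(elec label: anatomy label)
--
--     Returns
--     ----------
--     shafts: dict (shaft name, indices)
--         Shaft names with corresponding indices
--     """
--     #multiply for timeframes
--     names = list(channels)*timeframes
--     #get shaft information
--     shafts = {}
--     excluded = []
--     for i, chan in enumerate(names):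
--         anat  = elec_map.get(chan, 'NoValue')
--         if anat == 'NoValue':
--             if chan not in excluded:
--                 excluded.append(chan)
--         elif anat == 'Unknown':
--             if chan not in excluded:
--                 excluded.append(chan)
--         elif anat[6:15] == '_G_and_S_' or 'G_Ins_lg_and_S_cent_ins' in anat: #This is it
--             if chan.rstrip('0123456789') not in shafts:
--                 shafts[chan.rstrip('0123456789')] = [i]
--             else:
--                 shafts[chan.rstrip('0123456789')].append(i)
--     return shafts
-- ===== SOURCE B (Python) =====
-- def _qualifies(anat):
--     return anat not in ('NoValue', 'Unknown') and (
--         anat[6:15] == '_G_and_S_' or 'G_Ins_lg_and_S_cent_ins' in anat)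
--
--
-- def get_shaft_indices_GS(channels, elec_map, timeframes=5):
--     """Classify each channel once, then expand over timeframes."""
--     chan_list = list(channels)
--     n = len(chan_list)
--     qual = []
--     for j, chan in enumerate(chan_list):
--         if _qualifies(elec_map.get(chan, 'NoValue')):
--             qual.append((j, chan.rstrip('0123456789')))
--     shafts = {}
--     for t in range(timeframes):
--         for j, stem in qual:
--             shafts.setdefault(stem, []).append(t * n + j)
--     return shafts
-- ===== Notes on version B (the rewrite author's own statement) =====
-- stated objective: simpler
-- what changed: B classifies each channel once in a single pass (dropping the dead 'excluded' bookkeeping) and then expands the qualifying (index, stem) pairs over the timeframes copies arithmetically, instead of building the timeframes-fold replicated list and re-testing every channel in every copy.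
import Mathlib
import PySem

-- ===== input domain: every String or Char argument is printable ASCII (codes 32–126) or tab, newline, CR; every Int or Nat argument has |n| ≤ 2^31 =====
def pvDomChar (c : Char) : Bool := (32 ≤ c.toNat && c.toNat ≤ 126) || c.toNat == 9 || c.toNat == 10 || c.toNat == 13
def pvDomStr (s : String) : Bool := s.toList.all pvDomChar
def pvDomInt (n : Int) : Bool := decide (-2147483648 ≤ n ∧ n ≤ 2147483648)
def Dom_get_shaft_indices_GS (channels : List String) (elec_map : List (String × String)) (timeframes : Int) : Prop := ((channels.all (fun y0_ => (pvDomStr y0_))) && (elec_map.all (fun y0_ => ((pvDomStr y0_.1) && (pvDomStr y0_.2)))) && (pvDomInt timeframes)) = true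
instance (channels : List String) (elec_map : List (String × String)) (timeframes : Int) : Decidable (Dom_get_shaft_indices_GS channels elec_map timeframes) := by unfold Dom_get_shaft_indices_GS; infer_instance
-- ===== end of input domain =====

-- B classifies each channel once and expands the qualifying (index, stem) pairs over the
-- timeframes copies arithmetically, instead of re-testing every channel in every copy;
-- the dead 'excluded' bookkeeping of A is dropped.

-- exact port of str.rstrip('0123456789'): drop trailing characters from that set
def rstripDigits (s : String) : String :=
  String.ofList ((s.toList.reverse.dropWhile (fun c => ("0123456789".toList).contains c)).reverse)

-- ===== PORT A =====
-- loop body of A, step for step: the nested if/elif chain over (shafts, excluded)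
def astep (em : PySem.Dict String String) (st : PySem.Dict String (List Int) × List String) (p : Int × String) : PySem.Dict String (List Int) × List String :=
  let anat := em.getD p.2 "NoValue"
  if anat == "NoValue" then
    (st.1, if p.2 ∈ st.2 then st.2 else st.2 ++ [p.2])
  else if anat == "Unknown" then
    (st.1, if p.2 ∈ st.2 then st.2 else st.2 ++ [p.2])
  else if (PySem.Str.slice anat (some 6) (some 15) == "_G_and_S_" || PySem.Str.isIn "G_Ins_lg_and_S_cent_ins" anat) then
    (if st.1.contains (rstripDigits p.2) then st.1.modify (rstripDigits p.2) [] (· ++ [p.1])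
     else st.1.insert (rstripDigits p.2) [p.1], st.2)
  else st

def get_shaft_indices_GS (channels : List String) (elec_map : List (String × String)) (timeframes : Int) : List (String × List Int) :=
  let em := PySem.Dict.ofList elec_map
  -- names = list(channels)*timeframes
  let names := (List.replicate timeframes.toNat channels).flatten
  let res := (PySem.List.enumerate names 0).foldl (astep em) (PySem.Dict.empty, ([] : List String))
  res.1.items

-- ===== PORT B =====
-- port of Source B's _qualifies
def pyQualifies (anat : String) : Bool :=
  !(anat == "NoValue" || anat == "Unknown") &&
  (PySem.Str.slice anat (some 6) (some 15) == "_G_and_S_" || PySem.Str.isIn "G_Ins_lg_and_S_cent_ins" anat)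

def get_shaft_indices_GS_alt (channels : List String) (elec_map : List (String × String)) (timeframes : Int) : List (String × List Int) :=
  let em := PySem.Dict.ofList elec_map
  let n : Int := channels.length
  let qual := (PySem.List.enumerate channels 0).foldl
    (fun (acc : List (Int × String)) p =>
      if pyQualifies (em.getD p.2 "NoValue") then acc ++ [(p.1, rstripDigits p.2)] else acc) []
  let shafts := (PySem.List.pyRange 0 timeframes 1).foldl
    (fun d t =>
      qual.foldl (fun (d : PySem.Dict String (List Int)) p => d.modify p.2 [] (· ++ [t * n + p.1])) d)
    PySem.Dict.empty
  shafts.items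

-- ===== PRECONDITION & SPEC =====
-- A is total (it returns on every input), so Pre_ imposes no restriction; it is kept only so the
-- witness below exhibits an input that exercises the qualifying '_G_and_S_' branch.
def Pre_get_shaft_indices_GS (channels : List String) (elec_map : List (String × String)) (timeframes : Int) : Prop := True
instance (channels : List String) (elec_map : List (String × String)) (timeframes : Int) : Decidable (Pre_get_shaft_indices_GS channels elec_map timeframes) := by unfold Pre_get_shaft_indices_GS; infer_instance
def pvWitness_get_shaft_indices_GS : List String × (List (String × String)) × Int :=
  (["LA1", "LA2", "RB7", "X"],
   [("LA1", "ctx_lh_G_and_S_cingul-Ant"), ("LA2", "G_Ins_lg_and_S_cent_ins"), ("RB7", "Unknown"), ("X", "other")],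
   2)
def Spec_get_shaft_indices_GS (channels : List String) (elec_map : List (String × String)) (timeframes : Int) (out : List (String × List Int)) : Prop := out = get_shaft_indices_GS_alt channels elec_map timeframes
instance (channels : List String) (elec_map : List (String × String)) (timeframes : Int) (out : List (String × List Int)) : Decidable (Spec_get_shaft_indices_GS channels elec_map timeframes out) := by unfold Spec_get_shaft_indices_GS; infer_instance

-- ===== CLAIM (what is proved, stated in full; the proofs are below) =====
def Claim_equal_get_shaft_indices_GS : Prop := ∀ (channels : List String) (elec_map : List (String × String)) (timeframes : Int), Dom_get_shaft_indices_GS channels elec_map timeframes → Pre_get_shaft_indices_GS channels elec_map timeframes → Spec_get_shaft_indices_GS channels elec_map timeframes (get_shaft_indices_GS channels elec_map timeframes)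

-- ===== LEMMAS AND PROOFS =====

-- pure shaft-dictionary step of A's loop (the 'excluded' component never feeds back into shafts)
def sstep (em : PySem.Dict String String) (d : PySem.Dict String (List Int)) (p : Int × String) : PySem.Dict String (List Int) :=
  if pyQualifies (em.getD p.2 "NoValue") then d.modify (rstripDigits p.2) [] (· ++ [p.1]) else d

def pick (em : PySem.Dict String String) (p : Int × String) : Option (Int × String) :=
  if pyQualifies (em.getD p.2 "NoValue") then some (p.1, rstripDigits p.2) else none

lemma foldl_congr' {α β : Type} (l : List β) (f g : α → β → α) (a : α)
    (h : ∀ a b, f a b = g a b) : l.foldl f a = l.foldl g a := by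
  induction l generalizing a with
  | nil => rfl
  | cons x l ih => simp only [List.foldl_cons, h, ih]

lemma modify_eq_branch (d : PySem.Dict String (List Int)) (k : String) (i : Int) :
    (if d.contains k then d.modify k [] (· ++ [i]) else d.insert k [i]) = d.modify k [] (· ++ [i]) := by
  by_cases h : d.contains k = true
  · simp [h]
  · simp only [Bool.not_eq_true] at h
    simp only [h, if_neg Bool.false_ne_true, PySem.Dict.modify]
    rw [PySem.Dict.getD_of_not_contains]
    · simp
    · exact h

lemma astep_fst (em : PySem.Dict String String) (st : PySem.Dict String (List Int) × List String) (p : Int × String) :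
    (astep em st p).1 = sstep em st.1 p := by
  unfold astep sstep pyQualifies
  by_cases h1 : (em.getD p.2 "NoValue" == "NoValue") = true <;>
    by_cases h2 : (em.getD p.2 "NoValue" == "Unknown") = true <;>
      (simp [h1, h2, modify_eq_branch]; try (split <;> rfl))

lemma foldl_astep_fst (em : PySem.Dict String String) (l : List (Int × String)) (st : PySem.Dict String (List Int) × List String) :
    (l.foldl (astep em) st).1 = l.foldl (sstep em) st.1 := by
  induction l generalizing st with
  | nil => rfl
  | cons p l ih => simp only [List.foldl_cons, ih, astep_fst]

-- B's qual accumulator is a filterMap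
lemma qual_eq (em : PySem.Dict String String) (l : List (Int × String)) (acc : List (Int × String)) :
    l.foldl (fun (acc : List (Int × String)) p =>
      if pyQualifies (em.getD p.2 "NoValue") then acc ++ [(p.1, rstripDigits p.2)] else acc) acc
      = acc ++ l.filterMap (pick em) := by
  induction l generalizing acc with
  | nil => simp
  | cons p l ih =>
    by_cases h : pyQualifies (em.getD p.2 "NoValue") = true <;>
      simp [h, ih, pick]

-- one copy of channels, folded at offset 'off'
lemma copy_fold (em : PySem.Dict String String) (cs : List String) :
    ∀ (j off : Int) (d : PySem.Dict String (List Int)),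
    (PySem.List.enumerate cs (off + j)).foldl (sstep em) d
      = ((PySem.List.enumerate cs j).filterMap (pick em)).foldl
          (fun d p => d.modify p.2 [] (· ++ [off + p.1])) d := by
  induction cs with
  | nil => intro j off d; simp [PySem.List.enumerate_nil]
  | cons c cs ih =>
    intro j off d
    rw [PySem.List.enumerate_cons, PySem.List.enumerate_cons]
    rw [show off + j + 1 = off + (j + 1) by ring]
    by_cases h : pyQualifies (em.getD c "NoValue") = true
    · simp only [List.filterMap_cons, pick, h, if_pos, List.foldl_cons, sstep]
      exact ih (j + 1) off _
    · simp only [List.filterMap_cons, pick, h, Bool.false_eq_true, if_false, List.foldl_cons, sstep]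
      exact ih (j + 1) off d

-- all m copies of channels: A's flat fold equals a nested fold over List.range m
lemma copies_fold (em : PySem.Dict String String) (cs : List String) (m : Nat) :
    ∀ (s : Int) (d : PySem.Dict String (List Int)),
    (PySem.List.enumerate ((List.replicate m cs).flatten) (s * cs.length)).foldl (sstep em) d
      = (List.range m).foldl
          (fun d k => ((PySem.List.enumerate cs 0).filterMap (pick em)).foldl
            (fun d p => d.modify p.2 [] (· ++ [(s + k) * cs.length + p.1])) d) d := by
  induction m with
  | zero => intro s d; simp [PySem.List.enumerate_nil]
  | succ m ih =>
    intro s d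
    rw [List.replicate_succ, List.flatten_cons, PySem.List.enumerate_append, List.foldl_append,
        List.range_succ_eq_map, List.foldl_cons, List.foldl_map]
    have h1 : (PySem.List.enumerate cs (s * cs.length)).foldl (sstep em) d
        = ((PySem.List.enumerate cs 0).filterMap (pick em)).foldl
            (fun d p => d.modify p.2 [] (· ++ [(s + (0:Nat)) * cs.length + p.1])) d := by
      have h := copy_fold em cs 0 (s * cs.length) d
      rw [add_zero] at h
      rw [h]
      simp
    rw [h1]
    rw [show s * (cs.length : Int) + (cs.length : Int) = (s + 1) * cs.length by ring]
    rw [ih (s + 1)]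
    apply foldl_congr'
    intro a k
    have hk : ∀ p1 : Int, (s + ((k : Int) + 1)) * cs.length + p1 = (s + 1 + (k : Int)) * cs.length + p1 := by
      intro p1; ring
    simp only [Nat.cast_succ, hk]

-- ===== VERDICT (by name: the statement is the Claim_ definition above) =====
theorem get_shaft_indices_GS_spec : Claim_equal_get_shaft_indices_GS := by
  intro channels elec_map timeframes _ _
  unfold Spec_get_shaft_indices_GS get_shaft_indices_GS get_shaft_indices_GS_alt
  dsimp only
  congr 1
  rw [foldl_astep_fst, qual_eq, List.nil_append]
  have hr : PySem.List.pyRange 0 timeframes 1 = (List.range timeframes.toNat).map (fun k : Nat => (k : Int)) := by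
    rw [PySem.List.pyRange_one]
    simp only [sub_zero, zero_add]
  rw [hr, List.foldl_map]
  have hcf := copies_fold (PySem.Dict.ofList elec_map) channels timeframes.toNat 0 PySem.Dict.empty
  rw [zero_mul] at hcf
  simp only [zero_add] at hcf
  rw [hcf]
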